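-- pv_equiv track=rewrite | github.com/ryandavis3/leetcode | tree.py | get_max_level
-- ===== SOURCE A (Python) =====
-- import math
-- from typing import List
--
-- def get_max_level(values: List[int]) -> int:
--     L = len(values)
--     total = 1
--     level = 1
--     while total < L:
--         total += int(math.pow(2, level))
--         level += 1
--     return level
-- ===== SOURCE B (Python) =====
-- def get_max_level(values):
--     return max(1, len(values).bit_length())
-- ===== Notes on version B (the rewrite author's own statement) =====
-- stated objective: simpler
-- what changed: Replaces the doubling accumulation loop with the closed form max(1, len(values).bit_length()), since the loop computes ceil(log2(L+1)).
import Mathlib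
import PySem

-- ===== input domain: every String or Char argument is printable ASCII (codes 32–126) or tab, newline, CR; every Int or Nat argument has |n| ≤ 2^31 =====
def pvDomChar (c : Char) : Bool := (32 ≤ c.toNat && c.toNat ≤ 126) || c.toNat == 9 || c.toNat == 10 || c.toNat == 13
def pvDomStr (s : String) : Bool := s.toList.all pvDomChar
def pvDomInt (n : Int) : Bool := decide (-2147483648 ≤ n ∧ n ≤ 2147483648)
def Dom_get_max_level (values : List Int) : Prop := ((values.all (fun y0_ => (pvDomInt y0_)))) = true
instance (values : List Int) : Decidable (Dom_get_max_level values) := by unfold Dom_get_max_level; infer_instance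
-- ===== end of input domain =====

-- B replaces A's doubling accumulation loop with the closed form max(1, bit_length(len(values))); same result, simpler.


-- ===== PORT A =====
-- the while loop: total starts at 1, level at 1; while total < L, total += 2^level, level += 1
def pvLoopA (L total level : Int) : Int :=
  if total < L then
    pvLoopA L (total + 2 ^ level.toNat) (level + 1)
  else level
termination_by (L - total).toNat
decreasing_by
  have h1 : (0:Int) < 2 ^ level.toNat := by positivity
  omega

def get_max_level (values : List Int) : Int :=
  pvLoopA (values.length : Int) 1 1

-- ===== PORT B =====
def get_max_level_alt (values : List Int) : Int :=
  max 1 ((Nat.size values.length : Int))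

-- ===== PRECONDITION & SPEC =====
def Spec_get_max_level (values : List Int) (out : Int) : Prop := out = get_max_level_alt values
instance (values : List Int) (out : Int) : Decidable (Spec_get_max_level values out) := by unfold Spec_get_max_level; infer_instance

-- ===== CLAIM (what is proved, stated in full; the proofs are below) =====
def Claim_equal_get_max_level : Prop := ∀ (values : List Int), Dom_get_max_level values → Spec_get_max_level values (get_max_level values)

-- ===== LEMMAS AND PROOFS =====

-- loop invariant: entering the loop with total = 2^k - 1 and level = k returns max k (bit length of n)
theorem pvLoopA_eq (j : Nat) : ∀ (k : Nat) (n : Nat), 1 ≤ k → Nat.size n ≤ k + j →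
    pvLoopA (n : Int) ((2:Int) ^ k - 1) (k : Int) = max (k : Int) (Nat.size n : Int) := by
  induction j with
  | zero =>
    intro k n hk hsz
    have hlt : n < 2 ^ k := (Nat.size_le).mp (by omega)
    have hle : (n : Int) ≤ 2 ^ k - 1 := by
      have : (n : Int) < (2:Int) ^ k := by exact_mod_cast hlt
      omega
    rw [pvLoopA, if_neg (by omega)]
    have : (Nat.size n : Int) ≤ (k : Int) := by exact_mod_cast hsz
    omega
  | succ j ih =>
    intro k n hk hsz
    by_cases hlt : n < 2 ^ k
    · have hle : (n : Int) ≤ 2 ^ k - 1 := by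
        have : (n : Int) < (2:Int) ^ k := by exact_mod_cast hlt
        omega
      rw [pvLoopA, if_neg (by omega)]
      have : Nat.size n ≤ k := (Nat.size_le).mpr hlt
      have : (Nat.size n : Int) ≤ (k : Int) := by exact_mod_cast this
      omega
    · have h2n : 2 ^ k ≤ n := by omega
      have hklt : k < Nat.size n := Nat.lt_size.mpr h2n
      have hgt : (2:Int) ^ k - 1 < (n : Int) := by
        have : (2:Int) ^ k ≤ (n : Int) := by exact_mod_cast h2n
        omega
      rw [pvLoopA, if_pos hgt]
      have hc : ((k : Int)).toNat = k := Int.toNat_natCast k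
      have harg : (2:Int) ^ k - 1 + 2 ^ ((k : Int)).toNat = (2:Int) ^ (k + 1) - 1 := by
        rw [hc]; ring
      have harg2 : (k : Int) + 1 = ((k + 1 : Nat) : Int) := by push_cast; ring
      rw [harg, harg2, ih (k + 1) n (by omega) (by omega)]
      have : (k : Int) + 1 ≤ (Nat.size n : Int) := by exact_mod_cast hklt
      omega

-- ===== VERDICT (by name: the statement is the Claim_ definition above) =====
theorem get_max_level_spec : Claim_equal_get_max_level := by
  intro values _
  show get_max_level values = get_max_level_alt values
  unfold get_max_level get_max_level_alt
  have h := pvLoopA_eq (Nat.size values.length) 1 values.length (by omega) (by omega)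
  simpa using h
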